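-- pv_equiv track=rewrite | github.com/eduardoHoefel/dear-tool | main.py | split_per_file
-- ===== SOURCE A (Python) =====
-- def split_per_file(experiments):
--     per_file = {}
--     for e in experiments:
--         df = e['datafile']
--         file_properties = ",".join(df.split(","))
--         if file_properties not in per_file.keys():
--             per_file[file_properties] = []
--
--         per_file[file_properties].append(e)
--
--     return per_file
-- ===== SOURCE B (Python) =====
-- def split_per_file(experiments):
--     # Two-pass grouping: collect distinct keys in first-occurrence order,
--     # then build each group by filtering the input once per key.
--     keys = list(dict.fromkeys(e['datafile'] for e in experiments))
--     return {k: [e for e in experiments if e['datafile'] == k] for k in keys}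
-- ===== Notes on version B (the rewrite author's own statement) =====
-- stated objective: alternative
-- what changed: A's single scan that accumulates a dict (membership test, insert-empty, append per element) is replaced by a two-pass decomposition: an ordered dedup of the datafile keys, then one filter over the input per distinct key (also dropping the no-op ",".join(split(",")) recomputation).
import Mathlib
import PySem

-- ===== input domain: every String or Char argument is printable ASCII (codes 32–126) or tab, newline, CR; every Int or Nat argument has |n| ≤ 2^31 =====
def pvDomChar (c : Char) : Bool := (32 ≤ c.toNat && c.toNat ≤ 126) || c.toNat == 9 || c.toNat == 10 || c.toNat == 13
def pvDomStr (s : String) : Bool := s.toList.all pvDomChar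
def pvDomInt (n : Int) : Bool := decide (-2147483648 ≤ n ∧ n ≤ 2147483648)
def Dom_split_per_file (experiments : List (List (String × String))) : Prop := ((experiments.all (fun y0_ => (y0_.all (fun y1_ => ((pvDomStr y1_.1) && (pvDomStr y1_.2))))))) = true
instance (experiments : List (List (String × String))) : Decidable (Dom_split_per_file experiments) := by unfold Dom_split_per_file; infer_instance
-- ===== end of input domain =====

-- B replaces A's single dict-accumulating scan by a two-pass decomposition (ordered dedup of the
-- keys, then one filter per key); equivalence of the RETURN value is proved on inputs where every
-- experiment carries the 'datafile' key (elsewhere A raises KeyError).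

-- e['datafile'] — exact whenever the key is present (guaranteed by Pre_; first-match lookup)
def pvDatafile (e : List (String × String)) : String := (PySem.Dict.mk e).getD "datafile" ""

-- ===== PORT A =====
-- one iteration of A's loop body
def pvStepA (d : PySem.Dict String (List (List (String × String)))) (e : List (String × String)) :
    PySem.Dict String (List (List (String × String))) :=
  let df := pvDatafile e
  let fp := PySem.Str.join "," ((PySem.Str.split? df ",").getD [])
  let d1 := if d.contains fp then d else d.insert fp []
  d1.modify fp [] (fun v => v ++ [e])

def split_per_file (experiments : List (List (String × String))) :
    List (String × List (List (String × String))) :=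
  (experiments.foldl pvStepA PySem.Dict.empty).items

-- ===== PORT B =====
def split_per_file_alt (experiments : List (List (String × String))) :
    List (String × List (List (String × String))) :=
  let keys := PySem.List.dedup (experiments.map pvDatafile)
  keys.map (fun k => (k, experiments.filter (fun e => pvDatafile e == k)))

-- ===== PRECONDITION & SPEC =====
-- Pre_ excludes exactly the inputs where some experiment lacks the 'datafile' key: there A raises KeyError.
def Pre_split_per_file (experiments : List (List (String × String))) : Prop :=
  ∀ e ∈ experiments, "datafile" ∈ e.map Prod.fst
instance (experiments : List (List (String × String))) : Decidable (Pre_split_per_file experiments) := by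
  unfold Pre_split_per_file; infer_instance

def pvWitness_split_per_file : (List (List (String × String))) :=
  [[("datafile", "a"), ("runs", "3")], [("datafile", "b,c")], [("datafile", "a")]]

def Spec_split_per_file (experiments : List (List (String × String))) (out : List (String × List (List (String × String)))) : Prop := out = split_per_file_alt experiments
instance (experiments : List (List (String × String))) (out : List (String × List (List (String × String)))) : Decidable (Spec_split_per_file experiments out) := by unfold Spec_split_per_file; infer_instance

-- ===== CLAIM (what is proved, stated in full; the proofs are below) =====
def Claim_equal_split_per_file : Prop := ∀ (experiments : List (List (String × String))), Dom_split_per_file experiments → Pre_split_per_file experiments → Spec_split_per_file experiments (split_per_file experiments)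

-- ===== LEMMAS AND PROOFS =====

-- sep.join(s.split(sep)) == s, proved on the Chars side (no PySem lemma covers the round trip)
theorem pv_join_two (sep : List Char) (xs : List (List Char)) (u v : List Char) :
    PySem.Chars.join sep (xs ++ [u, v]) = PySem.Chars.join sep (xs ++ [u ++ sep ++ v]) := by
  induction xs with
  | nil => simp [PySem.Chars.join_cons_cons, PySem.Chars.join_singleton]
  | cons a t ih =>
    cases t with
    | nil => simp [PySem.Chars.join_cons_cons, PySem.Chars.join_singleton] at *
    | cons b t' =>
      simp only [List.cons_append, PySem.Chars.join_cons_cons] at *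
      rw [ih]

theorem pv_go_join (sep : List Char) (hsep : sep ≠ []) :
    ∀ (fuel : Nat) (l cur : List Char) (acc : List (List Char)), l.length < fuel →
    PySem.Chars.join sep (PySem.Chars.splitOn.go sep fuel l cur acc)
      = PySem.Chars.join sep (acc.reverse ++ [cur.reverse ++ l]) := by
  intro fuel
  induction fuel with
  | zero => intro l cur acc h; omega
  | succ f ih =>
    intro l cur acc h
    cases l with
    | nil =>
      rw [show PySem.Chars.splitOn.go sep (f+1) [] cur acc = (cur.reverse :: acc).reverse from rfl]
      simp
    | cons c rest =>
      by_cases hp : sep.isPrefixOf (c::rest) = true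
      · have hdrop : PySem.Chars.splitOn.go sep (f+1) (c::rest) cur acc
            = PySem.Chars.splitOn.go sep f ((c::rest).drop sep.length) [] (cur.reverse :: acc) := by
          conv_lhs => rw [PySem.Chars.splitOn.go]; simp [hp]
        have hlen : ((c::rest).drop sep.length).length < f := by
          have : 1 ≤ sep.length := by cases sep <;> simp_all
          simp [List.length_drop]; simp at h; omega
        have hpre : sep ++ List.drop sep.length (c :: rest) = c :: rest :=
          List.prefix_iff_eq_append.mp (List.isPrefixOf_iff_prefix.mp hp)
        rw [hdrop, ih _ _ _ hlen]
        simp only [List.reverse_cons, List.reverse_nil, List.nil_append, List.append_assoc,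
          List.singleton_append]
        rw [pv_join_two]
        simp [List.append_assoc, hpre]
      · have hstep : PySem.Chars.splitOn.go sep (f+1) (c::rest) cur acc
            = PySem.Chars.splitOn.go sep f rest (c :: cur) acc := by
          conv_lhs => rw [PySem.Chars.splitOn.go]; simp [hp]
        rw [hstep, ih _ _ _ (by simp at h ⊢; omega)]
        simp

theorem pv_join_splitOn (s sep : List Char) (hsep : sep ≠ []) :
    PySem.Chars.join sep (PySem.Chars.splitOn s sep) = s := by
  unfold PySem.Chars.splitOn
  rw [pv_go_join sep hsep _ _ _ _ (by omega)]
  simp [PySem.Chars.join_singleton]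

-- the key string A recomputes is just the datafile string itself
theorem pv_key_eq (s : String) :
    PySem.Str.join "," ((PySem.Str.split? s ",").getD []) = s := by
  have h : PySem.Str.split? s "," = some ((PySem.Chars.splitOn s.toList [',']).map String.ofList) := by
    rfl
  rw [h, Option.getD_some]
  simp only [PySem.Str.join, List.map_map]
  have h2 : (String.toList ∘ String.ofList) = id := by funext l; simp
  have hc : ",".toList = [','] := by rfl
  rw [h2, List.map_id, hc, pv_join_splitOn _ _ (by decide), String.ofList_toList]

-- A's guarded insert-then-append step is exactly one Dict.modify
theorem pv_stepA_eq (d : PySem.Dict String (List (List (String × String)))) (e : List (String × String)) :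
    pvStepA d e = d.modify (pvDatafile e) [] (fun v => v ++ [e]) := by
  simp only [pvStepA, pv_key_eq]
  by_cases hc : d.contains (pvDatafile e) = true
  · simp [hc]
  · simp only [Bool.not_eq_true] at hc
    simp only [hc, Bool.false_eq_true, if_false, PySem.Dict.modify]
    rw [PySem.Dict.getD_insert_self, PySem.Dict.insert_insert_self,
      PySem.Dict.getD_of_not_contains (h := hc)]

-- ===== VERDICT (by name: the statement is the Claim_ definition above) =====
theorem split_per_file_spec : Claim_equal_split_per_file := by
  intro experiments _ _
  unfold Spec_split_per_file split_per_file split_per_file_alt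
  have hfold : experiments.foldl pvStepA PySem.Dict.empty
      = (experiments.map (fun e => (pvDatafile e, e))).foldl
          (fun d p => d.modify p.1 [] (fun v => v ++ [p.2])) PySem.Dict.empty := by
    rw [List.foldl_map]
    apply PySem.List.foldl_congr_mem
    intro acc x _
    exact pv_stepA_eq acc x
  rw [hfold]
  set L := experiments.map (fun e => (pvDatafile e, e)) with hL
  have hnd : ((L.foldl (fun d p => d.modify p.1 [] (fun v => v ++ [p.2])) PySem.Dict.empty)).keys.Nodup := by
    exact PySem.Dict.nodup_keys_foldl_modify_key L (fun p => p.1)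
      [] (fun d p v => v ++ [p.2]) PySem.Dict.empty PySem.Dict.nodup_keys_empty
  rw [PySem.Dict.items_eq_map_keys _ hnd []]
  have hkeys : ((L.foldl (fun d p => d.modify p.1 [] (fun v => v ++ [p.2])) PySem.Dict.empty)).keys
      = PySem.Set.ofList (experiments.map pvDatafile) := by
    rw [PySem.Dict.keys_foldl_modify_key]
    simp [hL, PySem.Set.update, PySem.Set.ofList_eq_foldl, List.map_map, PySem.Dict.keys_empty, Function.comp_def]
  rw [hkeys]
  simp only [PySem.List.dedup_eq_ofList]
  apply List.map_congr_left
  intro k hk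
  congr 1
  rw [PySem.Dict.getD_foldl_modify_append]
  simp [hL, List.filter_map, List.map_map, Function.comp_def, PySem.Dict.getD_empty]
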